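-- pv_equiv track=rewrite | github.com/m-yaghini/autoencoder | code/preprocess.py | docs_vocab_freq_matrix
-- ===== SOURCE A (Python) =====
-- def docs_vocab_freq_matrix(docs, vocab):
--     '''
--     processes the documents into frequent distributions over the words of the vocabulary.
--     :param docs: (list) list of tokenized documents.
--     :param vocab: (list) list of vocabulary words
--     :return: a matrix of distribution of word frequencies for documents
--     '''
--     from collections import Counter
--
--     docs_freq_distribution = []
--     for doc in docs:
--         word_freq = Counter()
--         word_freq.update(doc)
--         doc_freq_dist = [word_freq[word] for word in vocab]
--         docs_freq_distribution.append(doc_freq_dist)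
--     return docs_freq_distribution
-- ===== SOURCE B (Python) =====
-- def docs_vocab_freq_matrix(docs, vocab):
--     # Build, once, an inverted index: word -> list of all column positions it
--     # occupies in vocab (a list, so duplicate vocab words each get the count).
--     index = {}
--     for i, word in enumerate(vocab):
--         index.setdefault(word, []).append(i)
--     matrix = []
--     n = len(vocab)
--     for doc in docs:
--         row = [0] * n
--         for word in doc:
--             if word in index:
--                 for pos in index[word]:
--                     row[pos] += 1
--         matrix.append(row)
--     return matrix
-- ===== Notes on version B (the rewrite author's own statement) =====
-- stated objective: alternative
-- what changed: Replaces the per-document Counter-then-gather-over-vocab with an inverted index (word -> vocab column positions) built once before the document loop; each document then scatters +1 into a preallocated zero row for each of its words found in the index.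
import Mathlib
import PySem

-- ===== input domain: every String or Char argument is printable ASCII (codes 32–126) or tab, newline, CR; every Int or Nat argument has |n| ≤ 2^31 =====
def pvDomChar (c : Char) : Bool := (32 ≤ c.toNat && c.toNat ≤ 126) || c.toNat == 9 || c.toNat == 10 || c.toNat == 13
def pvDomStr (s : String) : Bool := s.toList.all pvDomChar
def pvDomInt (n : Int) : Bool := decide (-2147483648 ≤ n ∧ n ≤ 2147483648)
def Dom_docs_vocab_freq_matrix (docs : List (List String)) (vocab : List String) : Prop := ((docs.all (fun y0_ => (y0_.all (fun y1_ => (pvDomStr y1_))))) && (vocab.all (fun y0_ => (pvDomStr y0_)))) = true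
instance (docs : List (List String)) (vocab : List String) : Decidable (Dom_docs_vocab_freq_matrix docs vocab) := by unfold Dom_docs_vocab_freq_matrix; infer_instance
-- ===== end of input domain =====

-- B builds an inverted index (word -> vocab column positions) once and scatters
-- counts into a zero row per document, instead of A's per-document Counter
-- gathered over vocab; alternative structure, no speed claim.

-- ===== PORT A =====
-- word_freq = Counter(); word_freq.update(doc)
def pvCounterA (doc : List String) : PySem.Dict String Int :=
  doc.foldl (fun d x => d.modify x 0 (· + 1)) PySem.Dict.empty
def docs_vocab_freq_matrix (docs : List (List String)) (vocab : List String) : List (List Int) :=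
  docs.foldl
    (fun acc doc =>
      let word_freq := pvCounterA doc
      let doc_freq_dist := vocab.map (fun word => word_freq.getD word 0)
      acc ++ [doc_freq_dist])
    []

-- ===== PORT B =====
-- index.setdefault(word, []).append(i)
def pvIndexB (vocab : List String) : PySem.Dict String (List Int) :=
  (PySem.List.enumerate vocab).foldl
    (fun d p => d.modify p.2 [] (· ++ [p.1])) PySem.Dict.empty
def pvScatterB (positions : List Int) (row : List Int) : List Int :=
  positions.foldl (fun r j => PySem.List.pySetD r j (PySem.List.pyGetD r j 0 + 1)) row

def docs_vocab_freq_matrix_alt (docs : List (List String)) (vocab : List String) : List (List Int) :=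
  let index := pvIndexB vocab
  let n := vocab.length
  docs.foldl
    (fun matrix doc =>
      let row :=
        doc.foldl
          (fun row word =>
            if index.contains word then pvScatterB (index.getD word []) row else row)
          (List.replicate n 0)
      matrix ++ [row])
    []

-- ===== PRECONDITION & SPEC =====
def Spec_docs_vocab_freq_matrix (docs : List (List String)) (vocab : List String) (out : List (List Int)) : Prop := out = docs_vocab_freq_matrix_alt docs vocab
instance (docs : List (List String)) (vocab : List String) (out : List (List Int)) : Decidable (Spec_docs_vocab_freq_matrix docs vocab out) := by unfold Spec_docs_vocab_freq_matrix; infer_instance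

-- ===== CLAIM (what is proved, stated in full; the proofs are below) =====
def Claim_equal_docs_vocab_freq_matrix : Prop := ∀ (docs : List (List String)) (vocab : List String), Dom_docs_vocab_freq_matrix docs vocab → Spec_docs_vocab_freq_matrix docs vocab (docs_vocab_freq_matrix docs vocab)

-- ===== LEMMAS AND PROOFS =====
theorem pvA_row (doc : List String) (vocab : List String) :
    vocab.map (fun word => (pvCounterA doc).getD word 0)
      = vocab.map (fun word => (doc.count word : Int)) := by
  simp [pvCounterA, ← PySem.Dict.counter_eq_foldl, PySem.Dict.getD_counter]

theorem pvIndex_getD (vocab : List String) (w : String) :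
    (pvIndexB vocab).getD w []
      = ((PySem.List.enumerate vocab).filter (fun p => p.2 == w)).map (·.1) := by
  have h : pvIndexB vocab = ((PySem.List.enumerate vocab).map Prod.swap).foldl
      (fun d p => d.modify p.1 [] (· ++ [p.2])) PySem.Dict.empty := by
    rw [List.foldl_map]; rfl
  rw [h, PySem.Dict.getD_foldl_modify_append]
  simp [List.filter_map, List.map_map, Function.comp_def]

theorem pvIndex_contains (vocab : List String) (w : String) :
    (pvIndexB vocab).contains w = true ↔ w ∈ vocab := by
  rw [PySem.Dict.contains_iff_mem_keys]
  unfold pvIndexB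
  rw [PySem.Dict.keys_foldl_modify_key]
  simp [PySem.Dict.keys_empty, PySem.List.map_snd_enumerate]

theorem pvPositions_mem (vocab : List String) (w : String) (j : Int) :
    j ∈ (pvIndexB vocab).getD w [] ↔
      ∃ (m : Nat) (h : m < vocab.length), j = (m : Int) ∧ vocab[m] = w := by
  rw [pvIndex_getD]
  simp only [List.mem_map, List.mem_filter, PySem.List.mem_enumerate_iff]
  constructor
  · rintro ⟨p, ⟨⟨m, hm, rfl⟩, hw⟩, rfl⟩
    exact ⟨m, hm, by simp, by simpa using hw⟩
  · rintro ⟨m, hm, rfl, hw⟩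
    exact ⟨((m : Int), vocab[m]), ⟨⟨m, hm, by simp⟩, by simpa using hw⟩, rfl⟩

theorem pvPositions_nodup (vocab : List String) (w : String) :
    ((pvIndexB vocab).getD w []).Nodup := by
  rw [pvIndex_getD]
  have h1 := PySem.List.pairwise_lt_enumerate (xs := vocab) (s := 0)
  have h2 := h1.filter (fun p => p.2 == w)
  have h3 : (((PySem.List.enumerate vocab 0).filter (fun p => p.2 == w)).map (·.1)).Pairwise (· < ·) :=
    List.pairwise_map.mpr h2
  exact h3.imp (fun h => ne_of_lt h)

theorem pvPositions_count (vocab : List String) (w : String) (k : Nat) (hk : k < vocab.length) :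
    ((pvIndexB vocab).getD w []).count (k : Int)
      = if vocab[k] = w then 1 else 0 := by
  by_cases hw : vocab[k] = w
  · rw [if_pos hw]
    exact List.count_eq_one_of_mem (pvPositions_nodup vocab w)
      ((pvPositions_mem vocab w k).mpr ⟨k, hk, rfl, hw⟩)
  · rw [if_neg hw]
    refine List.count_eq_zero.mpr (fun hmem => hw ?_)
    obtain ⟨m, hm, hjm, hvw⟩ := (pvPositions_mem vocab w _).mp hmem
    have : m = k := by exact_mod_cast hjm.symm
    subst this; exact hvw

theorem pvScatter_length (L : List Int) (row : List Int) :
    (pvScatterB L row).length = row.length := by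
  induction L generalizing row with
  | nil => rfl
  | cons j L ih => simp [pvScatterB, List.foldl_cons] at ih ⊢
                   rw [ih, PySem.List.length_pySetD]

theorem pvScatter_getD (L : List Int) (row : List Int)
    (hL : ∀ j ∈ L, 0 ≤ j ∧ j < (row.length : Int)) (k : Nat) (hk : k < row.length) :
    PySem.List.pyGetD (pvScatterB L row) (k : Int) 0
      = PySem.List.pyGetD row (k : Int) 0 + (L.count (k : Int) : Int) := by
  induction L generalizing row with
  | nil => simp [pvScatterB]
  | cons j L ih =>
    obtain ⟨hj0, hjlt⟩ := hL j (by simp)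
    have hjn : j = ((j.toNat : Nat) : Int) := by omega
    set row' := PySem.List.pySetD row j (PySem.List.pyGetD row j 0 + 1) with hrow'
    have hlen' : row'.length = row.length := PySem.List.length_pySetD _ _ _
    have hstep : pvScatterB (j :: L) row = pvScatterB L row' := rfl
    rw [hstep, ih row' (by rw [hlen']; intro x hx; exact hL x (by simp [hx])) (by rw [hlen']; exact hk)]
    have hget : PySem.List.pyGetD row' (k : Int) 0
        = if k = j.toNat then PySem.List.pyGetD row j 0 + 1 else PySem.List.pyGetD row (k : Int) 0 := by
      rw [hrow', hjn, PySem.List.pyGetD_pySetD_natCast row j.toNat k _ 0 (by omega), ← hjn]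
    rw [hget, List.count_cons]
    by_cases h : k = j.toNat
    · subst h
      have hje : (j == ((j.toNat : Nat) : Int)) = true := by rw [← hjn]; simp
      rw [if_pos rfl, hje, if_pos rfl, ← hjn]
      push_cast; ring
    · have hje : (j == (k : Int)) = false := by rw [beq_eq_false_iff_ne]; omega
      rw [if_neg h, hje]
      simp

theorem pvB_row (vocab : List String) (doc : List String) (row : List Int)
    (hlen : row.length = vocab.length) (k : Nat) (hk : k < vocab.length) :
    (doc.foldl
      (fun row word =>
        if (pvIndexB vocab).contains word then
          pvScatterB ((pvIndexB vocab).getD word []) row else row) row).length = vocab.length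
    ∧ PySem.List.pyGetD (doc.foldl
      (fun row word =>
        if (pvIndexB vocab).contains word then
          pvScatterB ((pvIndexB vocab).getD word []) row else row) row) (k : Int) 0
        = PySem.List.pyGetD row (k : Int) 0 + (doc.count (vocab[k]) : Int) := by
  induction doc generalizing row with
  | nil => simpa using hlen
  | cons w doc ih =>
    rw [List.foldl_cons]
    by_cases hc : (pvIndexB vocab).contains w = true
    · rw [if_pos hc]
      have hlen' : (pvScatterB ((pvIndexB vocab).getD w []) row).length = vocab.length := by
        rw [pvScatter_length]; exact hlen
      obtain ⟨h1, h2⟩ := ih _ hlen'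
      refine ⟨h1, ?_⟩
      rw [h2]
      have hsc := pvScatter_getD ((pvIndexB vocab).getD w []) row
        (by intro j hj
            obtain ⟨m, hm, rfl, _⟩ := (pvPositions_mem vocab w j).mp hj
            constructor <;> [positivity; (rw [hlen]; exact_mod_cast hm)])
        k (by omega)
      rw [hsc, pvPositions_count vocab w k hk, List.count_cons]
      by_cases he : vocab[k] = w
      · have hbe : (w == vocab[k]) = true := by rw [beq_iff_eq]; exact he.symm
        rw [if_pos he, hbe]
        norm_num; ring
      · have hbe : (w == vocab[k]) = false := by
          rw [beq_eq_false_iff_ne]; exact fun h => he h.symm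
        rw [if_neg he, hbe]
        norm_num
    · rw [if_neg hc]
      obtain ⟨h1, h2⟩ := ih _ hlen
      refine ⟨h1, ?_⟩
      rw [h2, List.count_cons]
      have hw : w ∉ vocab := fun h => hc ((pvIndex_contains vocab w).mpr h)
      have : ¬ (w == vocab[k]) := by
        simp only [beq_iff_eq]; rintro rfl; exact hw (List.getElem_mem hk)
      simp [this]

theorem pvB_row_length (vocab : List String) (doc : List String) (row : List Int) :
    (doc.foldl
      (fun row word =>
        if (pvIndexB vocab).contains word then
          pvScatterB ((pvIndexB vocab).getD word []) row else row) row).length = row.length := by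
  induction doc generalizing row with
  | nil => rfl
  | cons w doc ih =>
    rw [List.foldl_cons, ih]
    split
    · rw [pvScatter_length]
    · rfl


-- ===== VERDICT (by name: the statement is the Claim_ definition above) =====
theorem docs_vocab_freq_matrix_spec : Claim_equal_docs_vocab_freq_matrix := by
  intro docs vocab _
  unfold Spec_docs_vocab_freq_matrix
  simp only [docs_vocab_freq_matrix, docs_vocab_freq_matrix_alt]
  rw [PySem.List.foldl_append_singleton_eq_map, PySem.List.foldl_append_singleton_eq_map]
  refine List.map_congr_left (fun doc _ => ?_)
  rw [pvA_row]
  have hlen0 : (List.replicate vocab.length (0:Int)).length = vocab.length := List.length_replicate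
  have hblen := pvB_row_length vocab doc (List.replicate vocab.length 0)
  apply List.ext_getElem (by simp [hblen])
  intro k hk1 hk2
  have hk : k < vocab.length := by simpa using hk1
  obtain ⟨-, h2⟩ := pvB_row vocab doc (List.replicate vocab.length 0) hlen0 k hk
  have e1 := PySem.List.pyGetD_eq_getElem (doc.foldl
      (fun row word =>
        if (pvIndexB vocab).contains word then
          pvScatterB ((pvIndexB vocab).getD word []) row else row) (List.replicate vocab.length 0))
      (i := (k : Int)) 0 (by positivity) (by rw [hblen, hlen0]; exact_mod_cast hk)
  have e0 := PySem.List.pyGetD_eq_getElem (List.replicate vocab.length (0:Int))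
      (i := (k : Int)) 0 (by positivity) (by rw [hlen0]; exact_mod_cast hk)
  rw [e1, e0, List.getElem_replicate] at h2
  rw [List.getElem_map]
  simpa using h2.symm
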